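-- pv_equiv track=rewrite | github.com/antonschulz/adventofcode | 2021/day5.py | countCrosses
-- ===== SOURCE A (Python) =====
-- def countCrosses(matrix):
--     count = 0
--     for num in matrix.keys():
--         temp = []
--         for xcoord in matrix[num]:
--             if(temp.count(xcoord) == 1):
--                 count += 1
--                 temp.append(xcoord)
--             else:
--                 temp.append(xcoord)
--     return count
-- ===== SOURCE B (Python) =====
-- def countCrosses(matrix):
--     total = 0
--     for xs in matrix.values():
--         freq = {}
--         for x in xs:
--             freq[x] = freq.get(x, 0) + 1
--         total += sum(1 for v in freq.values() if v >= 2)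
--     return total
-- ===== Notes on version B (the rewrite author's own statement) =====
-- stated objective: alternative
-- what changed: replaces A's inline second-occurrence detection via repeated list.count scans over a growing temp list with a one-pass frequency histogram per list followed by counting the values >= 2
import Mathlib
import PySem

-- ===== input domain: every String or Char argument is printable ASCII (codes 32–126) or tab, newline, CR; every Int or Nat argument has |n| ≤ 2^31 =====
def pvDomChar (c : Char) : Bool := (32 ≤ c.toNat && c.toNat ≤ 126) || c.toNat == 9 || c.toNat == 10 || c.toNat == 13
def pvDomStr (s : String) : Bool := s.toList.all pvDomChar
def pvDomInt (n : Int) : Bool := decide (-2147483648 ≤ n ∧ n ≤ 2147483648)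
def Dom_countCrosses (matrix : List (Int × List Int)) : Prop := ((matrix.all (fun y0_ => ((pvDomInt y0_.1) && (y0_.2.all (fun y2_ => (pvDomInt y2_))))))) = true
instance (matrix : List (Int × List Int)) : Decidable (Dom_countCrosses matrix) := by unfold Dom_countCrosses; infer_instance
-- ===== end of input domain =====

-- B replaces A's quadratic per-list 'temp.count(x) == 1' second-occurrence detection with a
-- one-pass frequency histogram per list followed by counting the values ≥ 2 (alternative algorithm).
-- The dict argument 'matrix' is its association list in insertion order (distinct keys, as in any
-- Python dict); iterating matrix.keys() and indexing is then iterating the items themselves.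

-- ===== PORT A =====
def countCrosses (matrix : List (Int × List Int)) : Int :=
  matrix.foldl
    (fun count p =>
      (p.2.foldl
        (fun (s : Int × List Int) xcoord =>
          if PySem.List.count s.2 xcoord == 1 then (s.1 + 1, s.2 ++ [xcoord])
          else (s.1, s.2 ++ [xcoord]))
        (count, ([] : List Int))).1)
    0

-- ===== PORT B =====
def countCrosses_alt (matrix : List (Int × List Int)) : Int :=
  matrix.foldl
    (fun total p =>
      total + (((PySem.Dict.values
          (p.2.foldl (fun (d : PySem.Dict Int Int) x => d.insert x (d.getD x 0 + 1))
            PySem.Dict.empty)).filter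
        (fun v => decide ((2 : Int) ≤ v))).length : Int))
    0

-- ===== PRECONDITION & SPEC =====
def Spec_countCrosses (matrix : List (Int × List Int)) (out : Int) : Prop := out = countCrosses_alt matrix
instance (matrix : List (Int × List Int)) (out : Int) : Decidable (Spec_countCrosses matrix out) := by unfold Spec_countCrosses; infer_instance

-- ===== CLAIM (what is proved, stated in full; the proofs are below) =====
def Claim_equal_countCrosses : Prop := ∀ (matrix : List (Int × List Int)), Dom_countCrosses matrix → Spec_countCrosses matrix (countCrosses matrix)

-- ===== LEMMAS AND PROOFS =====

-- In a Nodup list, splitting countP at the single possible occurrence of y.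
lemma countP_split (l : List Int) (p : Int → Bool) (y : Int) (hnd : l.Nodup) :
    l.countP p = (l.filter (fun a => !(a == y))).countP p
      + (if y ∈ l ∧ p y = true then 1 else 0) := by
  induction l with
  | nil => simp
  | cons a t ih =>
    have hnd' : t.Nodup := hnd.of_cons
    by_cases hay : a = y
    · subst hay
      have hnotin : a ∉ t := (List.nodup_cons.mp hnd).1
      have hft : t.filter (fun x => !(x == a)) = t :=
        List.filter_eq_self.mpr (fun x hx => by
          have : x ≠ a := fun h => hnotin (h ▸ hx)
          simp [this])
      by_cases hp : p a = true <;>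
        simp [hft, hp, hnotin]
    · have hya : ¬ (y = a) := fun h => hay h.symm
      have := ih hnd'
      by_cases hp : p a = true <;>
        simp [hay, hya, hp, this] <;> omega

-- The predicate characterising A's remaining contribution given the already-seen prefix t.
def pvTrig (t xs : List Int) (k : Int) : Bool :=
  decide (t.count k ≤ 1 ∧ 2 ≤ t.count k + xs.count k)

-- A's inner loop, started with seen-prefix t and counter c, adds exactly the number of distinct
-- elements of xs that reach total multiplicity ≥ 2 without having been seen twice in t already.
lemma innerA (xs : List Int) (t : List Int) (c : Int) :
    (xs.foldl
        (fun (s : Int × List Int) xcoord =>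
          if PySem.List.count s.2 xcoord == 1 then (s.1 + 1, s.2 ++ [xcoord])
          else (s.1, s.2 ++ [xcoord]))
        (c, t)).1
      = c + (((PySem.Set.ofList xs).filter (pvTrig t xs)).length : Int) := by
  induction xs generalizing t c with
  | nil => simp [PySem.Set.ofList]
  | cons y r ih =>
    have hcount : PySem.List.count t y = t.count y := PySem.List.count_eq t y
    have hstep :
        ((y :: r).foldl
          (fun (s : Int × List Int) xcoord =>
            if PySem.List.count s.2 xcoord == 1 then (s.1 + 1, s.2 ++ [xcoord])
            else (s.1, s.2 ++ [xcoord]))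
          (c, t)).1
        = ((if t.count y = 1 then (1:Int) else 0) + c)
          + (((PySem.Set.ofList r).filter (pvTrig (t ++ [y]) r)).length : Int) := by
      simp only [List.foldl_cons, hcount]
      by_cases h1 : t.count y = 1
      · rw [if_pos (by simp [h1])]
        rw [ih (t ++ [y]) (c + 1)]
        simp [h1]; ring
      · rw [if_neg (by simp [h1])]
        rw [ih (t ++ [y]) c]
        simp [h1]
    rw [hstep]
    -- now the combinatorial step on the filtered dedup lists
    have hofl : PySem.Set.ofList (y :: r) = y :: PySem.Set.discard (PySem.Set.ofList r) y :=
      PySem.Set.ofList_cons y r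
    have hdisc : PySem.Set.discard (PySem.Set.ofList r) y
        = (PySem.Set.ofList r).filter (fun a => !(a == y)) := by
      simp [PySem.Set.discard]
    have hcongr :
        ((PySem.Set.ofList r).filter (fun a => !(a == y))).filter (pvTrig t (y :: r))
        = ((PySem.Set.ofList r).filter (fun a => !(a == y))).filter (pvTrig (t ++ [y]) r) := by
      apply List.filter_congr
      intro a ha
      have hne : a ≠ y := by
        have := List.of_mem_filter ha
        simpa using this
      have hya : ¬ (y = a) := fun h => hne h.symm
      simp [pvTrig, List.count_append, hya]
    have hnodup : (PySem.Set.ofList r).Nodup := PySem.Set.nodup_ofList r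
    have hsplit := countP_split (PySem.Set.ofList r) (pvTrig (t ++ [y]) r) y hnodup
    have hmem : y ∈ PySem.Set.ofList r ↔ y ∈ r := PySem.Set.mem_ofList r y
    have hcnt : y ∈ r ↔ 0 < r.count y := (List.count_pos_iff).symm
    have hPy : pvTrig t (y :: r) y = decide (t.count y ≤ 1 ∧ 2 ≤ t.count y + (r.count y + 1)) := by
      simp [pvTrig]
    have hP'y : pvTrig (t ++ [y]) r y
        = decide (t.count y + 1 ≤ 1 ∧ 2 ≤ t.count y + 1 + r.count y) := by
      simp [pvTrig, List.count_append]

    have hL1 : ((PySem.Set.ofList r).filter (pvTrig (t ++ [y]) r)).length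
        = (((PySem.Set.ofList r).filter (fun a => !(a == y))).filter (pvTrig (t ++ [y]) r)).length
          + (if y ∈ PySem.Set.ofList r ∧ pvTrig (t ++ [y]) r y = true then 1 else 0) := by
      rw [List.countP_eq_length_filter, List.countP_eq_length_filter] at hsplit
      exact hsplit
    have goalNat :
        ((PySem.Set.ofList (y :: r)).filter (pvTrig t (y :: r))).length
        = (if t.count y = 1 then 1 else 0)
          + ((PySem.Set.ofList r).filter (pvTrig (t ++ [y]) r)).length := by
      rw [hofl, hdisc, List.filter_cons, hcongr]
      by_cases hy1 : t.count y = 1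
      · have hT : pvTrig t (y :: r) y = true := by
          rw [hPy]; simp only [decide_eq_true_eq]; omega
        have h2 : ¬ (y ∈ PySem.Set.ofList r ∧ pvTrig (t ++ [y]) r y = true) := by
          rw [hP'y]; intro ⟨_, hc⟩; simp at hc; omega
        rw [if_neg h2] at hL1
        rw [hT, if_pos rfl, if_pos hy1]
        simp only [List.length_cons]
        omega
      · by_cases hy0 : t.count y = 0
        · by_cases hyr : y ∈ r
          · have hpos : 0 < r.count y := hcnt.mp hyr
            have hT : pvTrig t (y :: r) y = true := by
              rw [hPy]; simp only [decide_eq_true_eq]; omega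
            have h2 : y ∈ PySem.Set.ofList r ∧ pvTrig (t ++ [y]) r y = true := by
              refine ⟨hmem.mpr hyr, ?_⟩
              rw [hP'y]; simp only [decide_eq_true_eq]; omega
            rw [if_pos h2] at hL1
            rw [hT, if_pos rfl, if_neg hy1]
            simp only [List.length_cons]
            omega
          · have hz : r.count y = 0 := List.count_eq_zero.mpr hyr
            have hT : pvTrig t (y :: r) y = false := by
              rw [hPy]; simp only [decide_eq_false_iff_not]; omega
            have h2 : ¬ (y ∈ PySem.Set.ofList r ∧ pvTrig (t ++ [y]) r y = true) := by
              intro ⟨hm, _⟩; exact hyr (hmem.mp hm)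
            rw [if_neg h2] at hL1
            rw [hT, if_neg (by simp), if_neg hy1]
            omega
        · have hT : pvTrig t (y :: r) y = false := by
            rw [hPy]; simp only [decide_eq_false_iff_not]; omega
          have h2 : ¬ (y ∈ PySem.Set.ofList r ∧ pvTrig (t ++ [y]) r y = true) := by
            rw [hP'y]; intro ⟨_, hc⟩; simp at hc; omega
          rw [if_neg h2] at hL1
          rw [hT, if_neg (by simp), if_neg hy1]
          omega
    rw [goalNat]
    by_cases hy1 : t.count y = 1 <;> simp [hy1] <;> omega

-- B's per-list histogram count equals the same distinct-with-multiplicity-≥2 count.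
lemma innerB (xs : List Int) :
    (((PySem.Dict.values
        (xs.foldl (fun (d : PySem.Dict Int Int) x => d.insert x (d.getD x 0 + 1))
          PySem.Dict.empty)).filter (fun v => decide ((2 : Int) ≤ v))).length : Int)
    = (((PySem.Set.ofList xs).filter (pvTrig [] xs)).length : Int) := by
  rw [PySem.Dict.foldl_insert_getD_add_one_eq_counter]
  have hvals : (PySem.Dict.counter xs).values
      = ((PySem.Set.ofList xs).map (fun k => (xs.count k : Int))) := by
    have := PySem.Dict.items_counter (xs := xs)
    simp only [PySem.Dict.values, this, List.map_map]
    rfl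
  rw [hvals, List.filter_map, List.length_map]
  have hfc : List.filter ((fun v => decide ((2:Int) ≤ v)) ∘ fun k => ((xs.count k : Nat) : Int))
        (PySem.Set.ofList xs)
      = List.filter (pvTrig [] xs) (PySem.Set.ofList xs) := by
    apply List.filter_congr
    intro a _
    simp [pvTrig, Function.comp]
  rw [hfc]

-- the two folds over the items agree list by list
lemma main_eq (matrix : List (Int × List Int)) :
    countCrosses matrix = countCrosses_alt matrix := by
  unfold countCrosses countCrosses_alt
  induction matrix using List.reverseRecOn with
  | nil => rfl
  | append_singleton ms p ih =>
    simp only [List.foldl_append, List.foldl_cons, List.foldl_nil]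
    rw [innerA p.2 [] _, innerB p.2, ih]

-- ===== VERDICT (by name: the statement is the Claim_ definition above) =====
theorem countCrosses_spec : Claim_equal_countCrosses := by
  intro matrix _
  exact main_eq matrix
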